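-- pv_equiv track=rewrite | github.com/holimart/langywrap | lib/langywrap/ralph/progress_dedupe.py | _injection_anchor
-- ===== SOURCE A (Python) =====
-- def _injection_anchor(block_body: list[str]) -> int:
--     """Where in the block body to insert merged metric lines.
--
--     Inject just before a trailing `---` separator if present, else before
--     any trailing blank lines, else at the end. Returns an offset within
--     `block_body` (0-based).
--     """
--     n = len(block_body)
--     # Walk back past trailing blanks
--     j = n
--     while j > 0 and block_body[j - 1].strip() == "":
--         j -= 1
--     # If the last non-blank line is `---`, inject before it
--     if j > 0 and block_body[j - 1].strip() == "---":
--         return j - 1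
--     return j
-- ===== SOURCE B (Python) =====
-- def _injection_anchor(block_body: list[str]) -> int:
--     """Where in the block body to insert merged metric lines.
--
--     Single forward pass tracking the last non-blank line; j is one past it
--     (0 if none). Then inject before a trailing `---` separator if present.
--     """
--     j = 0
--     for i, line in enumerate(block_body):
--         if line.strip() != "":
--             j = i + 1
--     if j > 0 and block_body[j - 1].strip() == "---":
--         return j - 1
--     return j
-- ===== Notes on version B (the rewrite author's own statement) =====
-- stated objective: alternative
-- what changed: Replaces the backward while-loop that walks past trailing blanks with a single forward pass maintaining a running last-non-blank index (j = last_nonblank+1, 0 if none), keeping the final trailing-'---' check.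
import Mathlib
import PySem

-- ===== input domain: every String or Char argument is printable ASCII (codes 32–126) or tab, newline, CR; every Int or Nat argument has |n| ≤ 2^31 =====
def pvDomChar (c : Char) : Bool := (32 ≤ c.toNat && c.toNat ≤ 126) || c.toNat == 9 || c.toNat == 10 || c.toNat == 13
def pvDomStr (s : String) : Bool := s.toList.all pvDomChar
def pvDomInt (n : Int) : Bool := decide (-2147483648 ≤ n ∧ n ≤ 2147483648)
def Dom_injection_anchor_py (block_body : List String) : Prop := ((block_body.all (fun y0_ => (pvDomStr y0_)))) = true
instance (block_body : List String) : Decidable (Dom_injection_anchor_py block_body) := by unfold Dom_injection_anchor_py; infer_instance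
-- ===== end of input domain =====

-- B replaces A's backward walk past trailing blanks by a single forward pass
-- maintaining a running last-non-blank index (alternative decomposition, same cost).


-- ===== PORT A =====
-- the while loop `while j > 0 and block_body[j-1].strip() == "": j -= 1`
-- (the index j-1 is always in range, so List.getD is exact here)
def pvWalkBack (xs : List String) : Nat → Nat
  | 0 => 0
  | j + 1 => if PySem.Str.strip (xs.getD j "") = "" then pvWalkBack xs j else j + 1

def injection_anchor_py (block_body : List String) : Int :=
  let n := block_body.length
  let j := pvWalkBack block_body n
  if 0 < j ∧ PySem.Str.strip (block_body.getD (j - 1) "") = "---" then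
    (j : Int) - 1
  else
    (j : Int)

-- ===== PORT B =====
-- forward pass: j = (index of last non-blank line) + 1, 0 if none
def injection_anchor_py_alt (block_body : List String) : Int :=
  let j := (PySem.List.enumerate block_body).foldl
    (fun acc p => if PySem.Str.strip p.2 ≠ "" then p.1 + 1 else acc) 0
  if 0 < j ∧ PySem.Str.strip (block_body.getD (j - 1).toNat "") = "---" then
    j - 1
  else
    j

-- ===== PRECONDITION & SPEC =====
def Spec_injection_anchor_py (block_body : List String) (out : Int) : Prop := out = injection_anchor_py_alt block_body
instance (block_body : List String) (out : Int) : Decidable (Spec_injection_anchor_py block_body out) := by unfold Spec_injection_anchor_py; infer_instance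

-- ===== CLAIM (what is proved, stated in full; the proofs are below) =====
def Claim_equal_injection_anchor_py : Prop := ∀ (block_body : List String), Dom_injection_anchor_py block_body → Spec_injection_anchor_py block_body (injection_anchor_py block_body)

-- ===== LEMMAS AND PROOFS =====

-- B's fold, as a standalone function of the list
def pvFwd (xs : List String) : Int :=
  (PySem.List.enumerate xs).foldl
    (fun acc p => if PySem.Str.strip p.2 ≠ "" then p.1 + 1 else acc) 0

theorem pvWalkBack_append (xs : List String) (s : String) (j : Nat) (h : j ≤ xs.length) :
    pvWalkBack (xs ++ [s]) j = pvWalkBack xs j := by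
  induction j with
  | zero => rfl
  | succ j ih =>
    have hj : j < xs.length := h
    simp only [pvWalkBack, List.getD, List.getElem?_append_left hj]
    rw [ih (by omega)]
    rfl

theorem pvFwd_append (xs : List String) (s : String) :
    pvFwd (xs ++ [s]) =
      if PySem.Str.strip s ≠ "" then (xs.length : Int) + 1 else pvFwd xs := by
  simp only [pvFwd, PySem.List.enumerate_append, List.foldl_append]
  simp [PySem.List.enumerate]

theorem pvWalk_eq_fwd (xs : List String) :
    (pvWalkBack xs xs.length : Int) = pvFwd xs := by
  induction xs using List.reverseRecOn with
  | nil => rfl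
  | append_singleton xs s ih =>
    rw [pvFwd_append]
    have hlen : (xs ++ [s]).length = xs.length + 1 := by simp
    rw [hlen]
    by_cases hb : PySem.Str.strip s = ""
    · simp only [pvWalkBack, List.getD, List.getElem?_append_right (le_refl xs.length)]
      simp [hb, pvWalkBack_append xs s xs.length (le_refl _), ih]
    · simp only [pvWalkBack, List.getD, List.getElem?_append_right (le_refl xs.length)]
      simp [hb]

-- ===== VERDICT (by name: the statement is the Claim_ definition above) =====
theorem injection_anchor_py_spec : Claim_equal_injection_anchor_py := by
  intro xs _
  show injection_anchor_py xs = injection_anchor_py_alt xs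
  simp only [injection_anchor_py, injection_anchor_py_alt]
  have h := pvWalk_eq_fwd xs
  set jA := pvWalkBack xs xs.length with hjA
  have hfold : (PySem.List.enumerate xs).foldl
      (fun acc p => if PySem.Str.strip p.2 ≠ "" then p.1 + 1 else acc) 0 = (jA : Int) := h.symm
  rw [hfold]
  have hidx : ((jA : Int) - 1).toNat = jA - 1 := by omega
  rw [hidx]
  by_cases hp : 0 < jA
  · simp [hp]
  · simp [hp]
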